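-- pv_equiv track=rewrite | github.com/ecmoyer/middle_english_tts | text_to_phonemes.py | read_terminal_input
-- ===== SOURCE A (Python) =====
-- def read_terminal_input(phrase):
--     word_list = []
--     phrase = phrase.lower()
--
--     word = ""
--     for c in phrase:
--         if c not in [" ", ".", ",", "!", "?", ";"]:
--             word += c
--         else:
--             word_list.append(word)
--             word = ""
--             word_list.append(c)
--
--     if word != "":
--         word_list.append(word)
--
--     return word_list
-- ===== SOURCE B (Python) =====
-- def read_terminal_input(phrase):
--     s = phrase.lower()
--     parts = []
--     prev = 0
--     for j, c in enumerate(s):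
--         if c in " .,!?;":
--             parts.append(s[prev:j])
--             parts.append(c)
--             prev = j + 1
--     if prev < len(s):
--         parts.append(s[prev:])
--     return parts
-- ===== Notes on version B (the rewrite author's own statement) =====
-- stated objective: faster
-- what changed: B drops A's character-by-character word accumulator and instead does one scan that, at each delimiter, emits the word as a slice s[prev:j] between the previous delimiter and the current one (plus a final slice for the tail).
import Mathlib
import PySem

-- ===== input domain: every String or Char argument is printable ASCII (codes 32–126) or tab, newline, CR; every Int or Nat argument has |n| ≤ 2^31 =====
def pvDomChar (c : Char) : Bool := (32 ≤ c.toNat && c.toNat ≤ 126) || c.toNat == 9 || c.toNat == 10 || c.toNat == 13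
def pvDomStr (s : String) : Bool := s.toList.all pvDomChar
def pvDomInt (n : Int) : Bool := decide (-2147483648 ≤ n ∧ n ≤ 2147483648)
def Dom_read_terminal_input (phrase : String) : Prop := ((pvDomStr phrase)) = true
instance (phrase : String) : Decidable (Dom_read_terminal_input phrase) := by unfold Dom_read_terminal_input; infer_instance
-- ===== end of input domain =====

-- B replaces A's char-by-char word accumulator with a single pass that records
-- delimiter positions and emits the words as slices between them (no per-char string concat).

-- the delimiter set " .,!?;" shared by both programs
def pvIsDelim (c : Char) : Bool :=
  c == ' ' || c == '.' || c == ',' || c == '!' || c == '?' || c == ';'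

-- ===== PORT A =====
-- the accumulating python string `word` is carried as its list of characters (exact)
def read_terminal_input (phrase : String) : List String :=
  let cs := (PySem.Str.lower phrase).toList
  let st := cs.foldl (fun (st : List String × List Char) c =>
      if !(pvIsDelim c) then (st.1, st.2 ++ [c])
      else (st.1 ++ [String.ofList st.2, String.ofList [c]], [])) (([], []) : List String × List Char)
  if st.2 ≠ [] then st.1 ++ [String.ofList st.2] else st.1

-- ===== PORT B =====
def read_terminal_input_alt (phrase : String) : List String :=
  let s := (PySem.Str.lower phrase).toList
  let st := (PySem.List.enumerate s).foldl
      (fun (st : List String × Int) (jc : Int × Char) =>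
        if pvIsDelim jc.2 then
          (st.1 ++ [String.ofList (PySem.List.slice s (some st.2) (some jc.1)), String.ofList [jc.2]],
           jc.1 + 1)
        else st) (([], 0) : List String × Int)
  if st.2 < (s.length : Int) then st.1 ++ [String.ofList (PySem.List.slice s (some st.2) none)]
  else st.1

-- ===== PRECONDITION & SPEC =====
def Spec_read_terminal_input (phrase : String) (out : List String) : Prop := out = read_terminal_input_alt phrase
instance (phrase : String) (out : List String) : Decidable (Spec_read_terminal_input phrase out) := by unfold Spec_read_terminal_input; infer_instance

-- ===== CLAIM (what is proved, stated in full; the proofs are below) =====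
def Claim_equal_read_terminal_input : Prop := ∀ (phrase : String), Dom_read_terminal_input phrase → Spec_read_terminal_input phrase (read_terminal_input phrase)

-- ===== LEMMAS AND PROOFS =====

lemma pv_main (s : List Char) (t : List Char) (k prev : Nat) (wl : List String)
    (ht : t = s.drop k) (hp : prev ≤ k) :
    (let stA := t.foldl (fun (st : List String × List Char) c =>
        if !(pvIsDelim c) then (st.1, st.2 ++ [c])
        else (st.1 ++ [String.ofList st.2, String.ofList [c]], []))
        (wl, PySem.List.slice s (some (prev : Int)) (some (k : Int)));
     if stA.2 ≠ [] then stA.1 ++ [String.ofList stA.2] else stA.1)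
    =
    (let stB := (PySem.List.enumerate t (k : Int)).foldl
        (fun (st : List String × Int) (jc : Int × Char) =>
          if pvIsDelim jc.2 then
            (st.1 ++ [String.ofList (PySem.List.slice s (some st.2) (some jc.1)), String.ofList [jc.2]],
             jc.1 + 1)
          else st) (wl, (prev : Int));
     if stB.2 < (s.length : Int) then stB.1 ++ [String.ofList (PySem.List.slice s (some stB.2) none)]
     else stB.1) := by
  induction t generalizing k prev wl with
  | nil =>
    have hk : s.length ≤ k := by
      have := congrArg List.length ht
      simp at this; omega
    simp only [List.foldl_nil, PySem.List.enumerate_nil]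
    rw [PySem.List.slice_natCast, PySem.List.slice_from_natCast]
    have htake : (s.drop prev).take (k - prev) = s.drop prev := by
      apply List.take_of_length_le; simp; omega
    rw [htake]
    by_cases h : s.drop prev = []
    · have hlen : s.length ≤ prev := by
        have := congrArg List.length h
        simp at this; omega
      rw [if_neg (by simp [h]), if_neg (by exact_mod_cast not_lt.mpr hlen)]
    · have hlen : prev < s.length := by
        by_contra hcon
        exact h (List.drop_eq_nil_of_le (by omega))
      rw [if_pos (show s.drop prev ≠ [] from h), if_pos (by exact_mod_cast hlen)]
  | cons c t' ih =>
    have hk : k < s.length := by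
      have := congrArg List.length ht
      simp at this; omega
    have hc : s[k]? = some c := by
      have h0 : (List.drop k s)[0]? = some c := by rw [← ht]; rfl
      rw [List.getElem?_drop] at h0
      simpa using h0
    have ht' : t' = s.drop (k + 1) := by
      have := congrArg List.tail ht
      simpa [List.tail_drop] using this
    have hcast : ((k : Int) + 1) = ((k + 1 : Nat) : Int) := by push_cast; ring
    simp only [List.foldl_cons, PySem.List.enumerate_cons]
    by_cases hdel : pvIsDelim c = true
    · simp only [hdel, Bool.not_true, Bool.false_eq_true, if_true, if_false]
      rw [hcast]
      have hz : PySem.List.slice s (some ((k + 1 : Nat) : Int)) (some ((k + 1 : Nat) : Int)) = ([] : List Char) := by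
        rw [PySem.List.slice_natCast]; simp
      have hih := ih (k + 1) (k + 1)
        (wl ++ [String.ofList (PySem.List.slice s (some (prev : Int)) (some (k : Int))), String.ofList [c]])
        ht' le_rfl
      rw [hz] at hih
      exact hih
    · have hdel' : pvIsDelim c = false := by simpa using hdel
      simp only [hdel', Bool.not_false, Bool.false_eq_true, if_true, if_false]
      rw [hcast]
      have hext : PySem.List.slice s (some (prev : Int)) (some (k : Int)) ++ [c]
          = PySem.List.slice s (some (prev : Int)) (some ((k + 1 : Nat) : Int)) := by
        rw [PySem.List.slice_natCast, PySem.List.slice_natCast]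
        have h1 : k + 1 - prev = (k - prev) + 1 := by omega
        rw [h1, List.take_add_one]
        congr 1
        have h2 : (s.drop prev)[k - prev]? = some c := by
          rw [List.getElem?_drop]
          have h3 : prev + (k - prev) = k := by omega
          rw [h3, hc]
        simp [h2]
      rw [hext]
      exact ih (k + 1) prev wl ht' (by omega)

-- ===== VERDICT (by name: the statement is the Claim_ definition above) =====
theorem read_terminal_input_spec : Claim_equal_read_terminal_input := by
  intro phrase _
  unfold Spec_read_terminal_input read_terminal_input read_terminal_input_alt
  have h := pv_main ((PySem.Str.lower phrase).toList) ((PySem.Str.lower phrase).toList) 0 0 []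
    (by simp) (le_refl 0)
  simpa using h
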